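-- pv_equiv track=rewrite | github.com/SahibKazimli/LaunchSafe | backend/agents/fix/fix_patch_helpers.py | _naive_brace_depth
-- ===== SOURCE A (Python) =====
-- def _naive_brace_depth(text: str) -> int:
--     depth = 0
--     for char in text:
--         if char == "{":
--             depth += 1
--         elif char == "}":
--             depth -= 1
--     return depth
-- ===== SOURCE B (Python) =====
-- def _naive_brace_depth(text: str) -> int:
--     return text.count("{") - text.count("}")
-- ===== Notes on version B (the rewrite author's own statement) =====
-- stated objective: idiomatic
-- what changed: Replaced the fused per-character loop with a running depth accumulator by a single expression subtracting two aggregate str.count scans.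
import Mathlib
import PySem

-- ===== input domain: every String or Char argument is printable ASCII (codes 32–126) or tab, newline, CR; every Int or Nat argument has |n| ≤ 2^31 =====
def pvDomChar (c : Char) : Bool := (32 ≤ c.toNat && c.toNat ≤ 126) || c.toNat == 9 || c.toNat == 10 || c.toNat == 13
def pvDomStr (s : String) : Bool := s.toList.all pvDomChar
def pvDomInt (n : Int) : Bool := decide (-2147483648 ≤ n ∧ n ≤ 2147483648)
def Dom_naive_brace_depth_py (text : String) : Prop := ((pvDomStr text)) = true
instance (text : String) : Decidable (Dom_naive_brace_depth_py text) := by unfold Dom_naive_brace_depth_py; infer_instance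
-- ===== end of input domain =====

-- B replaces the per-character depth loop by two aggregate count scans subtracted (idiomatic).

-- ===== PORT A =====
def naive_brace_depth_py (text : String) : Int :=
  text.toList.foldl
    (fun depth char =>
      if char == '{' then depth + 1
      else if char == '}' then depth - 1
      else depth) 0

-- ===== PORT B =====
def naive_brace_depth_py_alt (text : String) : Int :=
  (PySem.Str.count text "{" : Int) - (PySem.Str.count text "}" : Int)

-- ===== PRECONDITION & SPEC =====
def Spec_naive_brace_depth_py (text : String) (out : Int) : Prop := out = naive_brace_depth_py_alt text
instance (text : String) (out : Int) : Decidable (Spec_naive_brace_depth_py text out) := by unfold Spec_naive_brace_depth_py; infer_instance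

-- ===== CLAIM (what is proved, stated in full; the proofs are below) =====
def Claim_equal_naive_brace_depth_py : Prop := ∀ (text : String), Dom_naive_brace_depth_py text → Spec_naive_brace_depth_py text (naive_brace_depth_py text)

-- ===== LEMMAS AND PROOFS =====

theorem count_go_single (c : Char) (l : List Char) (fuel acc : Nat)
    (h : l.length ≤ fuel) :
    PySem.Chars.count.go [c] fuel l acc = acc + l.count c := by
  induction l generalizing fuel acc with
  | nil => cases fuel <;> simp [PySem.Chars.count.go]
  | cons x t ih =>
    cases fuel with
    | zero => simp at h
    | succ n =>
      simp only [List.length_cons, Nat.succ_le_succ_iff] at h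
      rw [PySem.Chars.count.go]
      by_cases hx : x = c
      · subst hx
        have hp : [x].isPrefixOf (x :: t) = true := by simp [List.isPrefixOf]
        rw [if_pos hp]
        simp only [List.length_singleton, List.drop_one, List.tail_cons]
        rw [ih _ _ h, List.count_cons]
        simp
        omega
      · have hp : [c].isPrefixOf (x :: t) = false := by
          simp [List.isPrefixOf]
          exact fun hc => hx hc.symm
        rw [if_neg (by simp [hp]), ih _ _ h, List.count_cons]
        simp [hx]

theorem chars_count_single (c : Char) (l : List Char) :
    PySem.Chars.count l [c] = l.count c := by
  simp [PySem.Chars.count]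
  rw [count_go_single c l l.length 0 le_rfl]
  omega

theorem foldl_depth (l : List Char) (d : Int) :
    l.foldl
      (fun depth char =>
        if char == '{' then depth + 1
        else if char == '}' then depth - 1
        else depth) d
      = d + (l.count '{' : Int) - (l.count '}' : Int) := by
  induction l generalizing d with
  | nil => simp
  | cons x t ih =>
    rw [List.foldl_cons]
    split_ifs with h1 h2 <;> simp only [beq_iff_eq] at h1 <;>
      try simp only [beq_iff_eq] at h2
    · rw [ih, List.count_cons, List.count_cons]
      simp [h1, (by rw [h1]; decide : x ≠ '}')]
      push_cast; ring
    · rw [ih, List.count_cons, List.count_cons]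
      simp [h1, h2]
      push_cast; ring
    · rw [ih, List.count_cons, List.count_cons]
      simp [h1, h2]

-- ===== VERDICT (by name: the statement is the Claim_ definition above) =====
theorem naive_brace_depth_py_spec : Claim_equal_naive_brace_depth_py := by
  intro text _
  unfold Spec_naive_brace_depth_py naive_brace_depth_py naive_brace_depth_py_alt
  rw [PySem.Str.count_eq, PySem.Str.count_eq]
  show _ = ((PySem.Chars.count text.toList ['{'] : Int) - (PySem.Chars.count text.toList ['}'] : Int))
  rw [chars_count_single, chars_count_single, foldl_depth]
  ring
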